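-- pv_equiv track=rewrite | github.com/kelmer44/alfredtools | create_room0_city_lights.py | create_palette_rotation
-- ===== SOURCE A (Python) =====
-- def create_palette_rotation(base_palette, start_index, count, frames=2):
--     """
--     Create a series of palettes showing rotation animation.
--
--     Args:
--         base_palette: Base palette (768 bytes, 256 colors)
--         start_index: Starting palette index for rotation
--         count: Number of colors to rotate
--         frames: Number of rotation frames (default 2 for on/off effect)
--
--     Returns:
--         List of modified palettes
--     """
--     palettes = []
--
--     # Extract the colors that will rotate
--     rotating_colors = []
--     for i in range(count):
--         idx = start_index + i
--         color = (
--             base_palette[idx * 3],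
--             base_palette[idx * 3 + 1],
--             base_palette[idx * 3 + 2]
--         )
--         rotating_colors.append(color)
--
--     # Create rotation frames
--     for frame in range(frames):
--         new_palette = list(base_palette)
--
--         # Rotate the colors
--         for i in range(count):
--             idx = start_index + i
--             # Get color from rotated position
--             rotated_color = rotating_colors[(i + frame) % count]
--             new_palette[idx * 3] = rotated_color[0]
--             new_palette[idx * 3 + 1] = rotated_color[1]
--             new_palette[idx * 3 + 2] = rotated_color[2]
--
--         palettes.append(new_palette)
--
--     return palettes
-- ===== SOURCE B (Python) =====
-- def create_palette_rotation(base_palette, start_index, count, frames=2):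
--     """
--     Create a series of palettes showing rotation animation.
--     Slice-based rebuild: rotate the block with list slicing and splice it
--     between the untouched prefix and suffix of the base palette.
--     """
--     if count <= 0:
--         return [list(base_palette) for _ in range(frames)]
--     lo = start_index * 3
--     hi = (start_index + count) * 3
--     prefix = list(base_palette[:lo])
--     suffix = list(base_palette[hi:])
--     block = list(base_palette[lo:hi])
--     return [prefix + block[(frame % count) * 3:] + block[:(frame % count) * 3] + suffix
--             for frame in range(frames)]
-- ===== Notes on version B (the rewrite author's own statement) =====
-- stated objective: simpler
-- what changed: Replaces A's element-wise modular-index writes (extract tuples, then per-frame copy-and-overwrite each colour component) by slice arithmetic: cut the palette once into prefix/block/suffix and rebuild each frame as prefix + block[r:] + block[:r] + suffix.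
import Mathlib
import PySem

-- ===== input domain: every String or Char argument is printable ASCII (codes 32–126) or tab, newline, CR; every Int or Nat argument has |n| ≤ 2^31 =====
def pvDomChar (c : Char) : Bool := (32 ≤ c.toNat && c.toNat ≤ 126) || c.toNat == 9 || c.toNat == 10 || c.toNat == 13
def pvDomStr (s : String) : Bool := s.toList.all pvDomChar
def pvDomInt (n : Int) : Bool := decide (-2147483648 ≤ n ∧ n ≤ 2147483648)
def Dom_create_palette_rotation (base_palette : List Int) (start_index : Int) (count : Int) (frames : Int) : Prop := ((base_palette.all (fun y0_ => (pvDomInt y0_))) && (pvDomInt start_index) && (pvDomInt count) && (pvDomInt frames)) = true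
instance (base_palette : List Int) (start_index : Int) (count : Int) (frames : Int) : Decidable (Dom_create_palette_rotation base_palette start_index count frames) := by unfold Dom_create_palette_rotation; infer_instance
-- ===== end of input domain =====

-- B rebuilds each frame by slicing (prefix + rotated block via block[r:]+block[:r] + suffix)
-- instead of A's per-colour modular-index writes; objective: simpler.


-- ===== PORT A =====
-- A-side helper: one iteration of A's inner loop 'for i in range(count)': three element writes.
def pvStepA (rotating_colors : List (Int × Int × Int)) (start_index : Int) (frame : Int)
    (count : Int) (np : List Int) (i : Int) : List Int :=
  let idx := start_index + i
  let rotated_color := PySem.List.pyGetD rotating_colors (PySem.Int.mod (i + frame) count) (0, 0, 0)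
  let np1 := np.set (idx * 3).toNat rotated_color.1
  let np2 := np1.set (idx * 3 + 1).toNat rotated_color.2.1
  np2.set (idx * 3 + 2).toNat rotated_color.2.2

def create_palette_rotation (base_palette : List Int) (start_index : Int) (count : Int) (frames : Int) : List (List Int) :=
  let rotating_colors : List (Int × Int × Int) :=
    (PySem.List.pyRange 0 count 1).foldl (fun rc i =>
      let idx := start_index + i
      rc ++ [(PySem.List.pyGetD base_palette (idx * 3) 0,
              PySem.List.pyGetD base_palette (idx * 3 + 1) 0,
              PySem.List.pyGetD base_palette (idx * 3 + 2) 0)]) []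
  (PySem.List.pyRange 0 frames 1).foldl (fun palettes frame =>
    let new_palette :=
      (PySem.List.pyRange 0 count 1).foldl (pvStepA rotating_colors start_index frame count) base_palette
    palettes ++ [new_palette]) []

-- ===== PORT B =====
def create_palette_rotation_alt (base_palette : List Int) (start_index : Int) (count : Int) (frames : Int) : List (List Int) :=
  if count ≤ 0 then
    (PySem.List.pyRange 0 frames 1).map (fun _ => base_palette)
  else
    let lo := start_index * 3
    let hi := (start_index + count) * 3
    let pref := PySem.List.slice base_palette none (some lo)
    let suff := PySem.List.slice base_palette (some hi) none
    let block := PySem.List.slice base_palette (some lo) (some hi)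
    (PySem.List.pyRange 0 frames 1).map (fun frame =>
      pref ++ (PySem.List.slice block (some (PySem.Int.mod frame count * 3)) none
                 ++ PySem.List.slice block none (some (PySem.Int.mod frame count * 3))) ++ suff)

-- ===== PRECONDITION & SPEC =====
-- Pre_ restricts a positive-count rotation window to lie inside the palette (the function's natural
-- domain): outside it A either raises IndexError or reads/writes through Python negative-index
-- wraparound, while B's clamping slices return a differently shaped list.
def Pre_create_palette_rotation (base_palette : List Int) (start_index : Int) (count : Int) (frames : Int) : Prop :=
  count ≤ 0 ∨ (0 ≤ start_index ∧ 3 * (start_index + count) ≤ (base_palette.length : Int))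
instance (base_palette : List Int) (start_index : Int) (count : Int) (frames : Int) : Decidable (Pre_create_palette_rotation base_palette start_index count frames) := by unfold Pre_create_palette_rotation; infer_instance

def pvWitness_create_palette_rotation : List Int × Int × Int × Int := ([10, 20, 30, 40, 50, 60], 0, 2, 2)

def Spec_create_palette_rotation (base_palette : List Int) (start_index : Int) (count : Int) (frames : Int) (out : List (List Int)) : Prop := out = create_palette_rotation_alt base_palette start_index count frames
instance (base_palette : List Int) (start_index : Int) (count : Int) (frames : Int) (out : List (List Int)) : Decidable (Spec_create_palette_rotation base_palette start_index count frames out) := by unfold Spec_create_palette_rotation; infer_instance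

-- ===== CLAIM (what is proved, stated in full; the proofs are below) =====
def Claim_equal_create_palette_rotation : Prop := ∀ (base_palette : List Int) (start_index : Int) (count : Int) (frames : Int), Dom_create_palette_rotation base_palette start_index count frames → Pre_create_palette_rotation base_palette start_index count frames → Spec_create_palette_rotation base_palette start_index count frames (create_palette_rotation base_palette start_index count frames)

-- ===== LEMMAS AND PROOFS =====

-- the colour triple A stores for rotating index i, and the three flat palette entries it occupies
def pvColor (bp : List Int) (s i : Nat) : Int × Int × Int :=
  (bp.getD ((s + i) * 3) 0, bp.getD ((s + i) * 3 + 1) 0, bp.getD ((s + i) * 3 + 2) 0)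

def pvChunk (bp : List Int) (s i : Nat) : List Int :=
  [(pvColor bp s i).1, (pvColor bp s i).2.1, (pvColor bp s i).2.2]

lemma pvFlat3_length (l : List Nat) (f : Nat → List Int) (h : ∀ i, (f i).length = 3) :
    (l.flatMap f).length = 3 * l.length := by
  induction l with
  | nil => simp
  | cons a t ih => simp only [List.flatMap_cons, List.length_append, ih, h, List.length_cons]; ring

lemma pvChunk_length (bp : List Int) (s i : Nat) : (pvChunk bp s i).length = 3 := rfl

-- the rotating block of the palette, read off as the concatenation of its colour triples
lemma pvBlock_eq (bp : List Int) (s n : Nat) (h : (s + n) * 3 ≤ bp.length) :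
    (bp.drop (s * 3)).take (n * 3) = (List.range n).flatMap (pvChunk bp s) := by
  induction n with
  | zero => simp
  | succ m ih =>
    have hm : (s + m) * 3 ≤ bp.length := by omega
    have h0 : s * 3 + (m * 3 + 0) < bp.length := by omega
    have h1 : s * 3 + (m * 3 + 1) < bp.length := by omega
    have h2 : s * 3 + (m * 3 + 2) < bp.length := by omega
    rw [List.range_succ, List.flatMap_append, ← ih hm]
    have hstep : (m + 1) * 3 = m * 3 + 1 + 1 + 1 := by ring
    rw [hstep, List.take_add_one, List.take_add_one, List.take_add_one]
    simp only [List.getElem?_drop, List.append_assoc]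
    congr 1
    rw [List.getElem?_eq_getElem (by omega), List.getElem?_eq_getElem (by omega),
        List.getElem?_eq_getElem (by omega)]
    simp only [List.flatMap_cons, List.flatMap_nil, Option.toList_some]
    have g0 : (pvColor bp s m).1 = bp[s * 3 + (m * 3 + 0)] := by
      simp only [pvColor]
      rw [List.getD_eq_getElem?_getD, List.getElem?_eq_getElem (by omega)]
      simp; congr 1; omega
    have g1 : (pvColor bp s m).2.1 = bp[s * 3 + (m * 3 + 1)] := by
      simp only [pvColor]
      rw [List.getD_eq_getElem?_getD, List.getElem?_eq_getElem (by omega)]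
      simp; congr 1; omega
    have g2 : (pvColor bp s m).2.2 = bp[s * 3 + (m * 3 + 2)] := by
      simp only [pvColor]
      rw [List.getD_eq_getElem?_getD, List.getElem?_eq_getElem (by omega)]
      simp; congr 1; omega
    simp [pvChunk, g0, g1, g2]

-- rotating the index list [0..n) by k
lemma pvRotRange (n k : Nat) (hk : k < n) :
    (List.range n).map (fun i => (i + k) % n)
      = (List.range (n - k)).map (fun i => k + i) ++ List.range k := by
  have hsplit : List.range n = List.range (n - k) ++ (List.range k).map (fun x => (n - k) + x) := by
    rw [← List.range_add]; congr 1; omega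
  rw [hsplit, List.map_append, List.map_map]
  congr 1
  · apply List.map_congr_left
    intro a ha
    simp only [List.mem_range] at ha
    have : a + k < n := by omega
    rw [Nat.mod_eq_of_lt this]; omega
  · have : ∀ x ∈ List.range k, ((fun i => (i + k) % n) ∘ fun x => (n - k) + x) x = x := by
      intro x hx
      simp only [List.mem_range] at hx
      simp only [Function.comp]
      have : n - k + x + k = n + x := by omega
      rw [this, Nat.add_mod_left, Nat.mod_eq_of_lt (by omega)]
    rw [List.map_congr_left this]; simp

-- A's rotated chunk sequence splits into the two slices B concatenates
lemma pvRot_decomp (bp : List Int) (s n k : Nat) (hk : k < n) :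
    (List.range n).flatMap (fun i => pvChunk bp s ((i + k) % n))
      = (List.range (n - k)).flatMap (fun i => pvChunk bp s (k + i))
        ++ (List.range k).flatMap (pvChunk bp s) := by
  have h := congrArg (List.flatMap (pvChunk bp s)) (pvRotRange n k hk)
  rw [List.flatMap_map, List.flatMap_append, List.flatMap_map] at h
  exact h

lemma pvBlock_take (bp : List Int) (s n k : Nat) (hk : k ≤ n) :
    ((List.range n).flatMap (pvChunk bp s)).take (k * 3)
      = (List.range k).flatMap (pvChunk bp s) := by
  have hsplit : List.range n = List.range k ++ (List.range (n - k)).map (fun x => k + x) := by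
    rw [← List.range_add]; congr 1; omega
  rw [hsplit, List.flatMap_append]
  exact List.take_left' (by rw [pvFlat3_length _ _ (fun i => pvChunk_length bp s i)]; simp [List.length_range]; ring)

lemma pvBlock_drop (bp : List Int) (s n k : Nat) (hk : k ≤ n) :
    ((List.range n).flatMap (pvChunk bp s)).drop (k * 3)
      = (List.range (n - k)).flatMap (fun i => pvChunk bp s (k + i)) := by
  have hsplit : List.range n = List.range k ++ (List.range (n - k)).map (fun x => k + x) := by
    rw [← List.range_add]; congr 1; omega
  rw [hsplit, List.flatMap_append, List.flatMap_map]
  exact List.drop_left' (by rw [pvFlat3_length _ _ (fun i => pvChunk_length bp s i)]; simp [List.length_range]; ring)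

-- three consecutive writes into the middle of a spliced list
lemma pvSet3 (pre mid rest : List Int) (x y z a b c : Int) (L : Nat)
    (hL : L = pre.length + mid.length) :
    (((pre ++ mid ++ (x :: y :: z :: rest)).set L a).set (L + 1) b).set (L + 2) c
      = pre ++ (mid ++ [a, b, c]) ++ rest := by
  rw [← List.append_assoc]
  have hlen : (pre ++ mid).length = L := by simp [hL]
  rw [List.set_append, if_neg (by omega), hlen, Nat.sub_self]
  rw [List.set_append, if_neg (by omega), hlen, show L + 1 - L = 1 by omega]
  rw [List.set_append, if_neg (by omega), hlen, show L + 2 - L = 2 by omega]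
  simp [List.set]

-- invariant of A's inner write loop: after m iterations the first m triples are replaced
lemma pvFrameA (bp : List Int) (s n fN : Nat) (hn : 0 < n)
    (hlen : (s + n) * 3 ≤ bp.length) :
    ∀ m, m ≤ n →
    List.foldl (pvStepA ((List.range n).map (pvColor bp s)) (↑s) (↑fN) (↑n)) bp
        ((List.range m).map (fun j => Int.ofNat j))
      = bp.take (s * 3)
        ++ (List.range m).flatMap (fun i => pvChunk bp s ((i + fN) % n))
        ++ bp.drop (s * 3 + m * 3) := by
  intro m
  induction m with
  | zero => simp
  | succ m ih =>
    intro hm1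
    have hm : m ≤ n := by omega
    rw [List.range_succ, List.map_append, List.foldl_append, ih hm]
    simp only [List.map_cons, List.map_nil, List.foldl_cons, List.foldl_nil]
    -- evaluate the step
    unfold pvStepA
    simp only [Int.ofNat_eq_natCast]
    have hmod : PySem.Int.mod ((↑m : Int) + ↑fN) ↑n = ((((m + fN) % n : Nat)) : Int) := by
      rw [show ((m : Int) + (fN : Int)) = ((m + fN : Nat) : Int) by push_cast; ring,
          PySem.Int.mod_natCast]
    have hjn : (m + fN) % n < n := Nat.mod_lt _ hn
    rw [hmod, PySem.List.pyGetD_natCast, PySem.List.getD_map_range _ _ _ _ hjn]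
    have hidx0 : (((s : Int) + ↑m) * 3).toNat = (s + m) * 3 := by omega
    have hidx1 : (((s : Int) + ↑m) * 3 + 1).toNat = (s + m) * 3 + 1 := by omega
    have hidx2 : (((s : Int) + ↑m) * 3 + 2).toNat = (s + m) * 3 + 2 := by omega
    rw [hidx0, hidx1, hidx2]
    -- expose the three cells being written
    have hd0 : s * 3 + m * 3 < bp.length := by omega
    have hd1 : s * 3 + m * 3 + 1 < bp.length := by omega
    have hd2 : s * 3 + m * 3 + 2 < bp.length := by omega
    have hdrop : bp.drop (s * 3 + m * 3)
        = bp[s * 3 + m * 3] :: bp[s * 3 + m * 3 + 1] :: bp[s * 3 + m * 3 + 2]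
          :: bp.drop (s * 3 + m * 3 + 3) := by
      rw [List.drop_eq_getElem_cons hd0, List.drop_eq_getElem_cons hd1, List.drop_eq_getElem_cons hd2]
    rw [hdrop]
    have hpre : (bp.take (s * 3)).length = s * 3 := by
      rw [List.length_take]; omega
    have hmid : ((List.range m).flatMap (fun i => pvChunk bp s ((i + fN) % n))).length = 3 * m := by
      rw [pvFlat3_length _ _ (fun i => pvChunk_length bp s _)]; simp [List.length_range]
    have hset := pvSet3 (bp.take (s * 3))
        ((List.range m).flatMap (fun i => pvChunk bp s ((i + fN) % n)))
        (bp.drop (s * 3 + m * 3 + 3))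
        (bp[s * 3 + m * 3]) (bp[s * 3 + m * 3 + 1]) (bp[s * 3 + m * 3 + 2])
        ((pvColor bp s ((m + fN) % n)).1) ((pvColor bp s ((m + fN) % n)).2.1)
        ((pvColor bp s ((m + fN) % n)).2.2)
        ((s + m) * 3) (by rw [hpre, hmid]; ring)
    rw [show (s + m) * 3 + 1 = (s + m) * 3 + 1 from rfl] at hset
    rw [hset]
    congr 1
    · rw [List.flatMap_append]; simp [pvChunk]
    · congr 1; omega

-- A's rotating_colors list is the triple list pvColor
lemma pvRotColors (bp : List Int) (s n : Nat) :
    ((PySem.List.pyRange 0 (↑n) 1).foldl (fun rc i =>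
        rc ++ [(PySem.List.pyGetD bp (((↑s : Int) + i) * 3) 0,
                PySem.List.pyGetD bp (((↑s : Int) + i) * 3 + 1) 0,
                PySem.List.pyGetD bp (((↑s : Int) + i) * 3 + 2) 0)]) [])
      = (List.range n).map (pvColor bp s) := by
  rw [PySem.List.foldl_append_singleton_eq_map]
  rw [PySem.List.pyRange_zero, Int.toNat_natCast, List.map_map]
  apply List.map_congr_left
  intro j hj
  simp only [Function.comp]
  have h0 : ((s : Int) + ↑j) * 3 = (((s + j) * 3 : Nat) : Int) := by push_cast; ring
  have h1 : ((s : Int) + ↑j) * 3 + 1 = (((s + j) * 3 + 1 : Nat) : Int) := by push_cast; ring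
  have h2 : ((s : Int) + ↑j) * 3 + 2 = (((s + j) * 3 + 2 : Nat) : Int) := by push_cast; ring
  rw [h1, h2, h0, PySem.List.pyGetD_natCast, PySem.List.pyGetD_natCast, PySem.List.pyGetD_natCast]
  rfl

-- ===== VERDICT (by name: the statement is the Claim_ definition above) =====
theorem create_palette_rotation_spec : Claim_equal_create_palette_rotation := by
  intro bp si c fr _hdom hpre
  unfold Spec_create_palette_rotation
  by_cases hc : c ≤ 0
  · -- count ≤ 0 : both sides are `frames` copies of the base palette
    have hrange : PySem.List.pyRange 0 c 1 = [] := by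
      rw [PySem.List.pyRange_zero, Int.toNat_of_nonpos hc]; rfl
    simp only [create_palette_rotation, create_palette_rotation_alt, if_pos hc, hrange,
      List.foldl_nil]
    rw [PySem.List.foldl_append_singleton_eq_map (fun _ => bp) _ []]
    simp
  · have hc' : (0:Int) < c := by omega
    rcases hpre with h | ⟨hs, hlen⟩
    · omega
    obtain ⟨s, rfl⟩ : ∃ s : Nat, si = (s : Int) := ⟨si.toNat, (Int.toNat_of_nonneg hs).symm⟩
    obtain ⟨n, rfl⟩ : ∃ n : Nat, c = (n : Int) := ⟨c.toNat, (Int.toNat_of_nonneg (by omega)).symm⟩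
    have hn : 0 < n := by exact_mod_cast hc'
    have hlenN : (s + n) * 3 ≤ bp.length := by
      have := hlen; push_cast at this; omega
    -- rewrite both sides to maps over the frame range and compare pointwise
    simp only [create_palette_rotation, create_palette_rotation_alt, if_neg (by omega : ¬ (n : Int) ≤ 0)]
    rw [pvRotColors bp s n]
    rw [PySem.List.foldl_append_singleton_eq_map
      (fun frame => (PySem.List.pyRange 0 (↑n) 1).foldl
        (pvStepA ((List.range n).map (pvColor bp s)) (↑s) frame (↑n)) bp) _ []]
    simp only [List.nil_append]
    apply List.map_congr_left
    intro frame hfr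
    have hf0 : 0 ≤ frame := (PySem.List.mem_pyRange_one.mp hfr).1
    obtain ⟨fN, rfl⟩ : ∃ fN : Nat, frame = (fN : Int) := ⟨frame.toNat, (Int.toNat_of_nonneg hf0).symm⟩
    -- A's frame
    have hA : (PySem.List.pyRange 0 (↑n) 1).foldl
        (pvStepA ((List.range n).map (pvColor bp s)) (↑s) (↑fN) (↑n)) bp
        = bp.take (s * 3)
          ++ (List.range n).flatMap (fun i => pvChunk bp s ((i + fN) % n))
          ++ bp.drop (s * 3 + n * 3) := by
      rw [PySem.List.pyRange_zero, Int.toNat_natCast]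
      exact pvFrameA bp s n fN hn hlenN n le_rfl
    rw [hA]
    -- B's frame
    set k := fN % n with hkdef
    have hk : k < n := Nat.mod_lt _ hn
    have hmodf : PySem.Int.mod (↑fN) (↑n) = ((k : Nat) : Int) := PySem.Int.mod_natCast fN n
    have hlo : (s : Int) * 3 = (((s * 3 : Nat)) : Int) := by push_cast; ring
    have hhi : ((s : Int) + ↑n) * 3 = (((s * 3 + n * 3 : Nat)) : Int) := by push_cast; ring
    rw [hmodf, hlo, hhi]
    rw [show ((k : Nat) : Int) * 3 = (((k * 3 : Nat)) : Int) by push_cast; ring]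
    rw [PySem.List.slice_to_natCast, PySem.List.slice_from_natCast, PySem.List.slice_natCast,
        PySem.List.slice_from_natCast, PySem.List.slice_to_natCast]
    have hblock : (bp.drop (s * 3)).take (s * 3 + n * 3 - s * 3) = (List.range n).flatMap (pvChunk bp s) := by
      rw [show s * 3 + n * 3 - s * 3 = n * 3 by omega]
      exact pvBlock_eq bp s n hlenN
    rw [hblock, pvBlock_take bp s n k (le_of_lt hk), pvBlock_drop bp s n k (le_of_lt hk)]
    -- unify the rotated middles
    have hmods : ∀ i, (i + fN) % n = (i + k) % n := by
      intro i
      conv_lhs => rw [Nat.add_mod]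
      conv_rhs => rw [Nat.add_mod]
      rw [hkdef, Nat.mod_mod_of_dvd]
      exact dvd_refl n
    have hmid : (List.range n).flatMap (fun i => pvChunk bp s ((i + fN) % n))
        = (List.range (n - k)).flatMap (fun i => pvChunk bp s (k + i))
          ++ (List.range k).flatMap (pvChunk bp s) := by
      have : (fun i => pvChunk bp s ((i + fN) % n)) = (fun i => pvChunk bp s ((i + k) % n)) := by
        funext i; rw [hmods i]
      rw [this]
      exact pvRot_decomp bp s n k hk
    rw [hmid, List.append_assoc]
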